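-- pv_equiv track=rewrite | github.com/wakeguo/AlgorithmsAndDataStructures | 算法总结/BubbleSort_1.py | fund
-- ===== SOURCE A (Python) =====
-- def fund(array):
--     m = len(array)
--     count = 0
--     for n in range(m - 1, 0, -1):  # 注意不包含末端的，所以没有0的
--         for i in range(n):
--             if array[i] > array[i + 1]:
--                 array[i], array[i + 1] = array[i + 1], array[i]
--                 count += 1
--     return array, count
-- ===== SOURCE B (Python) =====
-- def fund(array):
--     n = len(array)
--     count = sum(sum(1 for j in range(i + 1, n) if array[i] > array[j]) for i in range(n))
--     return sorted(array), count
-- ===== Notes on version B (the rewrite author's own statement) =====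
-- stated objective: simpler
-- what changed: Replaces the in-place bubble sort with adjacent swap counting by the built-in sorted() plus a direct count of inversion pairs (i<j with a[i]>a[j]), which equals the number of adjacent swaps bubble sort performs.
import Mathlib
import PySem

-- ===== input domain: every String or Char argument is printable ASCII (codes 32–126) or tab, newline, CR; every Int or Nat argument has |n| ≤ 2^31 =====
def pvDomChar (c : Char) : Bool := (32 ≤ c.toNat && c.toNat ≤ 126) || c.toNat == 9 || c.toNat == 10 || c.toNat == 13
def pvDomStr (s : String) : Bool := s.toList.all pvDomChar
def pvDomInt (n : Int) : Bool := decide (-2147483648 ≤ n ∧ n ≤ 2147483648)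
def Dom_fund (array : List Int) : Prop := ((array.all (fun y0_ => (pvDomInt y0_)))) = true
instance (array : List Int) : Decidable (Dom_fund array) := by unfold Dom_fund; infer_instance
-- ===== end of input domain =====

-- B replaces A's in-place bubble sort (A mutates its argument; only the RETURN value is
-- compared here) by the built-in sort plus a direct count of the inversion pairs.

-- ===== PORT A =====
def fund (array : List Int) : List Int × Int :=
  let m : Int := array.length
  (PySem.List.pyRange (m - 1) 0 (-1)).foldl
    (fun st n =>
      (PySem.List.pyRange 0 n 1).foldl
        (fun st i =>
          if PySem.List.pyGetD st.1 i 0 > PySem.List.pyGetD st.1 (i + 1) 0 then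
            (PySem.List.pySetD (PySem.List.pySetD st.1 i (PySem.List.pyGetD st.1 (i + 1) 0))
               (i + 1) (PySem.List.pyGetD st.1 i 0), st.2 + 1)
          else st)
        st)
    (array, 0)

-- ===== PORT B =====
def fund_alt (array : List Int) : List Int × Int :=
  let n : Int := array.length
  let count : Int :=
    ((PySem.List.pyRange 0 n 1).map (fun i =>
      ((PySem.List.pyRange (i + 1) n 1).map (fun j =>
        if PySem.List.pyGetD array i 0 > PySem.List.pyGetD array j 0 then (1 : Int) else 0)).sum)).sum
  (PySem.List.sorted array (fun x => x) false, count)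

-- ===== PRECONDITION & SPEC =====
def Spec_fund (array : List Int) (out : List Int × Int) : Prop := out = fund_alt array
instance (array : List Int) (out : List Int × Int) : Decidable (Spec_fund array out) := by unfold Spec_fund; infer_instance

-- ===== CLAIM (what is proved, stated in full; the proofs are below) =====
def Claim_equal_fund : Prop := ∀ (array : List Int), Dom_fund array → Spec_fund array (fund array)

-- ===== LEMMAS AND PROOFS =====

-- number of inversion pairs of a list
def inv : List Int → Nat
  | [] => 0
  | x :: t => t.countP (fun y => decide (y < x)) + inv t

-- one bubble pass doing exactly k adjacent comparisons from the front
def passB : Nat → List Int → List Int × Nat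
  | 0, l => (l, 0)
  | _ + 1, [] => ([], 0)
  | _ + 1, [x] => ([x], 0)
  | k + 1, x :: y :: t =>
    if y < x then
      let p := passB k (x :: t); (y :: p.1, p.2 + 1)
    else
      let p := passB k (y :: t); (x :: p.1, p.2)

-- bubble passes with comparison bounds t, t-1, …, 1
def outerN : Nat → List Int → List Int × Nat
  | 0, l => (l, 0)
  | t + 1, l =>
    let p := passB (t + 1) l
    let q := outerN t p.1
    (q.1, p.2 + q.2)

-- the body of A's inner loop
def istep (st : List Int × Int) (i : Int) : List Int × Int :=
  if PySem.List.pyGetD st.1 i 0 > PySem.List.pyGetD st.1 (i + 1) 0 then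
    (PySem.List.pySetD (PySem.List.pySetD st.1 i (PySem.List.pyGetD st.1 (i + 1) 0))
       (i + 1) (PySem.List.pyGetD st.1 i 0), st.2 + 1)
  else st

lemma fund_eq (array : List Int) :
    fund array = (PySem.List.pyRange ((array.length : Int) - 1) 0 (-1)).foldl
      (fun st n => (PySem.List.pyRange 0 n 1).foldl istep st) (array, 0) := rfl

lemma passB_perm (k : Nat) (l : List Int) : (passB k l).1.Perm l := by
  induction k generalizing l with
  | zero => simp [passB]
  | succ k ih =>
    match l with
    | [] => simp [passB]
    | [x] => simp [passB]
    | x :: y :: t =>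
      simp only [passB]
      split
      · exact ((ih (x :: t)).cons y).trans (List.Perm.swap x y t)
      · exact (ih (y :: t)).cons x

lemma passB_length (k : Nat) (l : List Int) : (passB k l).1.length = l.length :=
  (passB_perm k l).length_eq

lemma passB_inv (k : Nat) (l : List Int) : inv l = inv (passB k l).1 + (passB k l).2 := by
  induction k generalizing l with
  | zero => simp [passB]
  | succ k ih =>
    match l with
    | [] => simp [passB, inv]
    | [x] => simp [passB, inv]
    | x :: y :: t =>
      simp only [passB]
      split
      · rename_i hyx
        have hperm := passB_perm k (x :: t)
        have hcnt : ((passB k (x :: t)).1).countP (fun z => decide (z < y))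
            = (x :: t).countP (fun z => decide (z < y)) := hperm.countP_eq _
        have hih := ih (x :: t)
        simp only [inv, List.countP_cons] at *
        simp [hcnt, hyx, not_lt.2 hyx.le] at *
        omega
      · rename_i hyx
        have hperm := passB_perm k (y :: t)
        have hcnt : ((passB k (y :: t)).1).countP (fun z => decide (z < x))
            = (y :: t).countP (fun z => decide (z < x)) := hperm.countP_eq _
        have hih := ih (y :: t)
        simp only [inv, List.countP_cons] at *
        simp [hcnt, hyx] at *
        omega

lemma passB_split (k : Nat) (l : List Int) (h : k + 1 ≤ l.length) :
    ∃ pre mx, (passB k l).1 = pre ++ mx :: l.drop (k + 1) ∧ pre.length = k ∧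
      (pre ++ [mx]).Perm (l.take (k + 1)) ∧ ∀ x ∈ pre, x ≤ mx := by
  induction k generalizing l with
  | zero =>
    match l, h with
    | x :: t, _ =>
      exact ⟨[], x, by simp [passB], rfl, by simp, by simp⟩
  | succ k ih =>
    match l, h with
    | x :: y :: t, h =>
      simp only [passB]
      split
      · rename_i hyx
        obtain ⟨pre, mx, h1, h2, h3, h4⟩ := ih (x :: t) (by simpa using h)
        refine ⟨y :: pre, mx, ?_, by simp [h2], ?_, ?_⟩
        · simp only [h1]
          simp [List.drop]
        · have : (x :: t).take (k + 1) = x :: t.take k := rfl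
          rw [this] at h3
          exact (h3.cons y).trans (List.Perm.swap x y (t.take k))
        · intro z hz
          rcases List.mem_cons.1 hz with rfl | hz
          · have hxmx : x ≤ mx := by
              have hx : x ∈ pre ++ [mx] := h3.symm.subset (by simp [List.take])
              rcases List.mem_append.1 hx with hx | hx
              · exact h4 _ hx
              · simp at hx; omega
            exact le_trans hyx.le hxmx
          · exact h4 _ hz
      · rename_i hyx
        obtain ⟨pre, mx, h1, h2, h3, h4⟩ := ih (y :: t) (by simpa using h)
        refine ⟨x :: pre, mx, ?_, by simp [h2], ?_, ?_⟩
        · simp only [h1]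
          simp [List.drop]
        · have : (y :: t).take (k + 1) = y :: t.take k := rfl
          rw [this] at h3
          exact h3.cons x
        · intro z hz
          rcases List.mem_cons.1 hz with rfl | hz
          · have hymx : y ≤ mx := by
              have hy : y ∈ pre ++ [mx] := h3.symm.subset (by simp)
              rcases List.mem_append.1 hy with hy | hy
              · exact h4 _ hy
              · simp at hy; omega
            exact le_trans (not_lt.1 hyx) hymx
          · exact h4 _ hz

lemma inv_eq_zero_of_pairwise (l : List Int) (h : l.Pairwise (· ≤ ·)) : inv l = 0 := by
  induction l with
  | nil => simp [inv]
  | cons x t ih =>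
    rw [List.pairwise_cons] at h
    simp [inv, ih h.2, List.countP_eq_zero]
    intro y hy
    exact h.1 y hy

lemma istep_shift (a : Int) (l : List Int) (c : Int) (j : Nat) :
    istep (a :: l, c) ((j : Int) + 1) = (a :: (istep (l, c) (j : Int)).1, (istep (l, c) (j : Int)).2) := by
  have e1 : ((j : Int) + 1) = ((j + 1 : Nat) : Int) := by push_cast; ring
  unfold istep
  rw [e1]
  have e2' : ((j + 1 : Nat) : Int) + 1 = ((j + 2 : Nat) : Int) := by push_cast; ring
  rw [e2']
  simp only [PySem.List.pyGetD_natCast, PySem.List.pySetD_natCast]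
  have g2 : (a :: l).getD (j + 2) 0 = l.getD (j + 1) 0 := rfl
  have g1 : (a :: l).getD (j + 1) 0 = l.getD j 0 := rfl
  have s1 : ∀ v, (a :: l).set (j + 1) v = a :: l.set j v := fun _ => rfl
  have s2 : ∀ (m : List Int) v, (a :: m).set (j + 2) v = a :: m.set (j + 1) v := fun _ _ => rfl
  simp only [g1, g2, s1, s2]
  split <;> simp

lemma fold_shift (js : List Nat) (a : Int) (l : List Int) (c : Int) :
    js.foldl (fun (st : List Int × Int) (j : Nat) => istep st ((j : Int) + 1)) (a :: l, c)
      = (a :: (js.foldl (fun (st : List Int × Int) (j : Nat) => istep st ((j : Int))) (l, c)).1,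
         (js.foldl (fun (st : List Int × Int) (j : Nat) => istep st ((j : Int))) (l, c)).2) := by
  induction js generalizing l c with
  | nil => rfl
  | cons j js ih =>
    simp only [List.foldl_cons]
    rw [istep_shift]
    have := ih (istep (l, c) (j : Int)).1 (istep (l, c) (j : Int)).2
    simpa using this

lemma inner_eq (k : Nat) (l : List Int) (c : Int) (h : k < l.length) :
    (List.range k).foldl (fun (st : List Int × Int) (j : Nat) => istep st ((j : Int))) (l, c)
      = ((passB k l).1, c + ((passB k l).2 : Int)) := by
  induction k generalizing l c with
  | zero => simp only [List.range_zero, List.foldl_nil, passB, Nat.cast_zero, add_zero]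
  | succ k ih =>
    match l, h with
    | x :: y :: t, h =>
      rw [List.range_succ_eq_map]
      simp only [List.foldl_cons, List.foldl_map]
      have hfirst : istep (x :: y :: t, c) ((0 : Nat) : Int)
          = (if y < x then (y :: x :: t, c + 1) else (x :: y :: t, c)) := by
        unfold istep
        norm_num [PySem.List.pyGetD, PySem.List.pySetD, PySem.List.pySet?, PySem.List.pyIdx?]
        have h0 : (0 : Int) ≤ (t.length : Int) + 1 := by positivity
        simp [h0]
      rw [hfirst]
      by_cases hc : y < x
      · rw [if_pos hc]
        simp only [Nat.succ_eq_add_one, Nat.cast_add, Nat.cast_one]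
        rw [fold_shift]
        rw [ih (x :: t) (c + 1) (by simpa using h)]
        simp only [passB, if_pos hc]
        push_cast
        ring_nf
      · rw [if_neg hc]
        simp only [Nat.succ_eq_add_one, Nat.cast_add, Nat.cast_one]
        rw [fold_shift]
        rw [ih (y :: t) c (by simpa using h)]
        simp only [passB, if_neg hc]

lemma outer_eq (t : Nat) (l : List Int) (c : Int) (h : t < l.length) :
    (PySem.List.pyRange (t : Int) 0 (-1)).foldl
        (fun st n => (PySem.List.pyRange 0 n 1).foldl istep st) (l, c)
      = ((outerN t l).1, c + ((outerN t l).2 : Int)) := by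
  induction t generalizing l c with
  | zero =>
    simp only [Nat.cast_zero]
    rw [PySem.List.pyRange_neg_one_eq_nil (le_refl 0)]
    simp [outerN]
  | succ t ih =>
    rw [PySem.List.pyRange_neg_one_cons (by positivity)]
    have e1 : ((t + 1 : Nat) : Int) - 1 = (t : Int) := by push_cast; ring
    rw [e1, List.foldl_cons]
    have hr : PySem.List.pyRange 0 ((t + 1 : Nat) : Int) 1
        = List.map (fun k : Nat => ((k : Int))) (List.range (t + 1)) := by
      rw [PySem.List.pyRange_one]
      norm_num
    rw [hr, List.foldl_map]
    rw [inner_eq (t + 1) l c h]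
    rw [ih (passB (t + 1) l).1 (c + ((passB (t + 1) l).2 : Int))
      (by rw [passB_length]; omega)]
    simp only [outerN]
    push_cast
    ring_nf

lemma outerN_sound (t : Nat) (l : List Int) (h : t < l.length)
    (hs : (l.drop (t + 1)).Pairwise (· ≤ ·))
    (hd : ∀ x ∈ l.take (t + 1), ∀ y ∈ l.drop (t + 1), x ≤ y) :
    (outerN t l).1.Perm l ∧ (outerN t l).1.Pairwise (· ≤ ·) ∧ (outerN t l).2 = inv l := by
  induction t generalizing l with
  | zero =>
    match l, h with
    | x :: r, _ =>
      refine ⟨List.Perm.refl _, ?_, ?_⟩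
      · simp only [outerN]
        rw [List.pairwise_cons]
        constructor
        · intro y hy
          exact hd x (by simp) y (by simpa using hy)
        · simpa using hs
      · simp only [outerN]
        refine (inv_eq_zero_of_pairwise _ ?_).symm
        rw [List.pairwise_cons]
        exact ⟨fun y hy => hd x (by simp) y (by simpa using hy), by simpa using hs⟩
  | succ t ih =>
    obtain ⟨pre, mx, h1, h2, h3, h4⟩ := passB_split (t + 1) l (by omega)
    set p := passB (t + 1) l with hp
    have hp1perm : p.1.Perm l := passB_perm _ _
    have hplen : p.1.length = l.length := passB_length _ _
    have hmxmem : mx ∈ l.take (t + 1 + 1) := h3.subset (by simp)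
    have hdrop : p.1.drop (t + 1) = mx :: l.drop (t + 1 + 1) := by
      rw [h1, ← h2, List.drop_left, h2]
    have htake : p.1.take (t + 1) = pre := by
      rw [h1, ← h2, List.take_left]
    have hs' : (p.1.drop (t + 1)).Pairwise (· ≤ ·) := by
      rw [hdrop, List.pairwise_cons]
      exact ⟨fun y hy => hd mx hmxmem y hy, hs⟩
    have hd' : ∀ x ∈ p.1.take (t + 1), ∀ y ∈ p.1.drop (t + 1), x ≤ y := by
      rw [hdrop, htake]
      intro x hx y hy
      rcases List.mem_cons.1 hy with rfl | hy
      · exact h4 x hx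
      · exact hd x (h3.subset (by simp [hx])) y hy
    have ht' : t < p.1.length := by omega
    obtain ⟨q1, q2, q3⟩ := ih p.1 ht' hs' hd'
    have hinv := passB_inv (t + 1) l
    rw [← hp] at hinv
    refine ⟨?_, ?_, ?_⟩
    · simp only [outerN, ← hp]
      exact q1.trans hp1perm
    · simp only [outerN, ← hp]
      exact q2
    · simp only [outerN, ← hp]
      omega

lemma inv_sum (l : List Int) :
    ((List.range l.length).map (fun k =>
      (l.drop (k + 1)).countP (fun y => decide (y < l.getD k 0)))).sum = inv l := by
  induction l with
  | nil => simp [inv]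
  | cons x t ih =>
    rw [List.length_cons, List.range_succ_eq_map]
    simp only [List.map_cons, List.map_map, List.sum_cons]
    have : ((List.range t.length).map (fun k =>
        ((x :: t).drop (k + 1 + 1)).countP (fun y => decide (y < (x :: t).getD (k + 1) 0)))).sum
        = inv t := by
      rw [← ih]
      congr 1
    simp only [Function.comp_def, Nat.succ_eq_add_one] at *
    rw [this]
    simp [inv]

lemma alt_count (l : List Int) :
    ((PySem.List.pyRange 0 (l.length : Int) 1).map (fun i =>
      ((PySem.List.pyRange (i + 1) (l.length : Int) 1).map (fun j =>
        if PySem.List.pyGetD l i 0 > PySem.List.pyGetD l j 0 then (1 : Int) else 0)).sum)).sum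
      = (inv l : Int) := by
  have hr : PySem.List.pyRange 0 (l.length : Int) 1
      = List.map (fun k : Nat => ((k : Int))) (List.range l.length) := by
    rw [PySem.List.pyRange_one]
    norm_num
  rw [hr, List.map_map]
  have hinner : ∀ k : Nat, k < l.length →
      ((PySem.List.pyRange ((k : Int) + 1) (l.length : Int) 1).map (fun j =>
        if PySem.List.pyGetD l (k : Int) 0 > PySem.List.pyGetD l j 0 then (1 : Int) else 0)).sum
      = ((l.drop (k + 1)).countP (fun y => decide (y < l.getD k 0)) : Int) := by
    intro k hk
    have hmap : (PySem.List.pyRange ((k : Int) + 1) (l.length : Int) 1).map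
        (fun j => PySem.List.pyGetD l j 0) = l.drop (k + 1) := by
      have := PySem.List.map_pyGetD_pyRange' (xs := l) (a := (k : Int) + 1) (d := 0) (by positivity)
      simpa using this
    have : ((PySem.List.pyRange ((k : Int) + 1) (l.length : Int) 1).map (fun j =>
        if PySem.List.pyGetD l (k : Int) 0 > PySem.List.pyGetD l j 0 then (1 : Int) else 0))
        = (l.drop (k + 1)).map (fun y => if y < l.getD k 0 then (1 : Int) else 0) := by
      rw [← hmap, List.map_map]
      simp [Function.comp_def]
    rw [this]
    rw [show (fun y => if y < l.getD k 0 then (1 : Int) else 0)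
        = (fun y => if (fun z : Int => decide (z < l.getD k 0)) y = true then (1 : Int) else 0) by
      funext y; simp]
    exact PySem.List.sum_map_ite_one_zero _ _
  have hcongr : List.map ((fun i => ((PySem.List.pyRange (i + 1) (l.length : Int) 1).map (fun j =>
        if PySem.List.pyGetD l i 0 > PySem.List.pyGetD l j 0 then (1 : Int) else 0)).sum) ∘ (fun k : Nat => (k : Int)))
        (List.range l.length)
      = List.map (fun k : Nat => (((l.drop (k + 1)).countP (fun y => decide (y < l.getD k 0)) : Nat) : Int))
        (List.range l.length) := by
    apply List.map_congr_left
    intro k hk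
    simpa using hinner k (List.mem_range.1 hk)
  rw [hcongr]
  have hcast : ∀ (g : Nat → Nat) (xs : List Nat),
      (xs.map (fun k => ((g k : Int)))).sum = (((xs.map g).sum : Nat) : Int) := by
    intro g xs
    induction xs with
    | nil => simp
    | cons a t ih => simp [ih]
  rw [hcast]
  rw [show (List.range l.length).map (fun k =>
      (l.drop (k + 1)).countP (fun y => decide (y < l.getD k 0))) = _ from rfl, inv_sum]

lemma fund_alt_eq (array : List Int) :
    fund_alt array = (PySem.List.sorted array (fun x => x) false,
      ((PySem.List.pyRange 0 ((array.length : Int)) 1).map (fun i =>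
        ((PySem.List.pyRange (i + 1) ((array.length : Int)) 1).map (fun j =>
          if PySem.List.pyGetD array i 0 > PySem.List.pyGetD array j 0 then (1 : Int) else 0)).sum)).sum) := rfl

-- ===== VERDICT (by name: the statement is the Claim_ definition above) =====
theorem fund_spec : Claim_equal_fund := by
  intro array _
  unfold Spec_fund
  match array with
  | [] => rfl
  | a :: rest =>
    have hlen : 1 ≤ (a :: rest).length := by simp
    rw [fund_eq, fund_alt_eq]
    have e1 : (((a :: rest).length : Int) - 1) = (((a :: rest).length - 1 : Nat) : Int) := by
      push_cast [Nat.cast_sub hlen]; ring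
    rw [e1, outer_eq ((a :: rest).length - 1) (a :: rest) 0 (by omega)]
    have hidx : (a :: rest).length - 1 + 1 = (a :: rest).length := by omega
    obtain ⟨q1, q2, q3⟩ := outerN_sound ((a :: rest).length - 1) (a :: rest) (by omega)
      (by rw [hidx]; simp) (by rw [hidx]; simp)
    have hlist : (outerN ((a :: rest).length - 1) (a :: rest)).1
        = PySem.List.sorted (a :: rest) (fun x => x) false := by
      refine List.Perm.eq_of_pairwise (fun u v _ _ h1 h2 => le_antisymm h1 h2) q2 ?_
        (q1.trans (PySem.List.sorted_perm (a :: rest) (fun x => x) false).symm)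
      simpa using PySem.List.sorted_pairwise (a :: rest) (fun x => x)
    rw [alt_count (a :: rest)]
    rw [hlist, q3]
    simp
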